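-- pv_equiv track=rewrite | github.com/alyswidan/CompilerFrontEnd | ParserAnalyserGenerator/table-construction/tableConstruction.py | constructParsingTable
-- ===== SOURCE A (Python) =====
-- def constructParsingTable(first, follow, terminals):
--
--     terminals.append('$') # append $ to the list of terminals
--     table = {} # the dict of dicts that will be returned at the end
--
--     for non_terminal_key in first.keys():
--
--         entry_in_table = {}
--         for terminal_key in terminals:
--
--             # check if in first of the non terminal
--             if terminal_key in [item for sublist in first[non_terminal_key].values() for item in sublist]:
--                 for val in first[non_terminal_key].values():
--                     if terminal_key in val and terminal_key:
--                         entry_in_table[terminal_key] = non_terminal_key + '->' + \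
--                                                 ''.join([k for k,v in first[non_terminal_key].items() if terminal_key in v])
--
--             # check if in the follow of the non terminal
--             elif terminal_key in follow[non_terminal_key]:
--                 if '\L' not in [item for sublist in first[non_terminal_key].values() for item in sublist]:
--                     entry_in_table[terminal_key] = 'sync'
--                 else:
--                     entry_in_table[terminal_key] = non_terminal_key + "->\L"
--
--             # if not in the first nor the follow of the terminal the error
--             else:
--                 entry_in_table[terminal_key] = 'empty'
--
--         table[non_terminal_key] = entry_in_table
--
--     return table
-- ===== SOURCE B (Python) =====
-- def constructParsingTable(first, follow, terminals):
--     terminals.append('$')  # same in-place append as the original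
--     table = {}
--     for nt, prods in first.items():
--         # one sym -> concatenated-production-keys index per nonterminal,
--         # instead of re-flattening and re-scanning all productions per cell
--         prodcell = {}
--         for k, syms in prods.items():
--             for s in dict.fromkeys(syms):
--                 prodcell[s] = prodcell.get(s, '') + k
--         folval = nt + '->\L' if '\L' in prodcell else 'sync'
--         fol = follow.get(nt, ())
--         cell = {}
--         for t in terminals:
--             v = prodcell.get(t)
--             if v is not None:
--                 if t:  # the original writes no cell for an empty-string terminal found in FIRST
--                     cell[t] = nt + '->' + v
--             elif t in fol:
--                 cell[t] = folval
--             else: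
--                 cell[t] = 'empty'
--         table[nt] = cell
--     return table
-- ===== Notes on version B (the rewrite author's own statement) =====
-- stated objective: faster
-- what changed: A re-flattens all FIRST sets and re-scans every production for every (nonterminal, terminal) cell; B builds one symbol-to-concatenated-production-keys index per nonterminal and fills the row in a single pass over the terminals with one lookup per cell.
import Mathlib
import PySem

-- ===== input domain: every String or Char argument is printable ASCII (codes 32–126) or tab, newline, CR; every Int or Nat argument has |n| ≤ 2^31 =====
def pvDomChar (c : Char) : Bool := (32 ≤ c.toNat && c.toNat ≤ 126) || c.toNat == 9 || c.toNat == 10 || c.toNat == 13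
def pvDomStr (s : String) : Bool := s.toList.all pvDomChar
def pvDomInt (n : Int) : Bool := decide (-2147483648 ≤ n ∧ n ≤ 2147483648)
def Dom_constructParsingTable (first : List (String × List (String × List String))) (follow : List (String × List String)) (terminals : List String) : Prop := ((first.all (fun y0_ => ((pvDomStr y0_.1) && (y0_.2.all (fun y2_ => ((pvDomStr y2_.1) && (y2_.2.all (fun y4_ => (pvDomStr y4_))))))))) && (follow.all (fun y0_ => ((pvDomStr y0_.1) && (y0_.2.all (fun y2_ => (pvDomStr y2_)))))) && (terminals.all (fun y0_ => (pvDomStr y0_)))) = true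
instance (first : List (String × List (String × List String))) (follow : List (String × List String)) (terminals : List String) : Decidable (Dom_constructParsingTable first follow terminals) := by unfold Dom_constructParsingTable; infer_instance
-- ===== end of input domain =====

-- B replaces A's per-cell re-flattening and production re-scan by one symbol→productions index per
-- nonterminal plus a single pass over the terminals (objective: faster, constant-factor/asymptotic per row).
-- Both A and B append '$' to the caller's `terminals` list in place; the claims are about the return value.

-- ===== PORT A =====
-- A's cell string: nt + '->' + ''.join([k for k,v in first[nt].items() if t in v])
def pvA_prodStr (nt : String) (fd : PySem.Dict String (List String)) (t : String) : String :=
  nt ++ "->" ++ PySem.Str.join "" ((fd.items.filter (fun kv => decide (t ∈ kv.2))).map (·.1))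

-- one iteration of A's inner 'for terminal_key in terminals' loop; none = the KeyError follow[nt]
def pvA_entryStep (nt : String) (fd : PySem.Dict String (List String))
    (followD : PySem.Dict String (List String))
    (acc : Option (PySem.Dict String String)) (t : String) : Option (PySem.Dict String String) :=
  match acc with
  | none => none
  | some e =>
    if t ∈ fd.values.flatten then
      -- for val in first[nt].values(): if t in val and t: entry[t] = …
      some (fd.values.foldl (fun e2 val =>
        if t ∈ val ∧ t ≠ "" then e2.insert t (pvA_prodStr nt fd t) else e2) e)
    else
      match followD.get? nt with
      | none => none
      | some fol =>
        if t ∈ fol then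
          if "\\L" ∉ fd.values.flatten then some (e.insert t "sync")
          else some (e.insert t (nt ++ "->\\L"))
        else some (e.insert t "empty")

def constructParsingTable (first : List (String × List (String × List String))) (follow : List (String × List String)) (terminals : List String) : List (String × List (String × String)) :=
  let terms := terminals ++ ["$"]
  let firstD := PySem.Dict.ofList (first.map (fun q => (q.1, PySem.Dict.ofList q.2)))
  let followD := PySem.Dict.ofList follow
  let table : Option (PySem.Dict String (PySem.Dict String String)) :=
    firstD.items.foldl (fun tbl p =>
      match tbl with
      | none => none
      | some tb =>
        match terms.foldl (pvA_entryStep p.1 p.2 followD) (some PySem.Dict.empty) with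
        | none => none
        | some e => some (tb.insert p.1 e)) (some PySem.Dict.empty)
  match table with
  | some tb => tb.items.map (fun q => (q.1, q.2.items))
  | none => []  -- unreachable under Pre_ (Python raises KeyError here)

-- ===== PORT B =====
-- B's per-nonterminal index: sym -> concatenation of the keys of the productions whose FIRST holds sym
def pvB_prodcell (fd : PySem.Dict String (List String)) : PySem.Dict String String :=
  fd.items.foldl (fun d kv =>
    (PySem.List.dedup kv.2).foldl (fun d2 s => d2.insert s (d2.getD s "" ++ kv.1)) d)
    PySem.Dict.empty

-- B's row: one pass over the terminals, a get on the index per cell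
def pvB_row (nt : String) (fd : PySem.Dict String (List String))
    (followD : PySem.Dict String (List String)) (terms : List String) : PySem.Dict String String :=
  let prodcell := pvB_prodcell fd
  let folval := if prodcell.contains "\\L" then nt ++ "->\\L" else "sync"
  let fol := followD.getD nt []
  terms.foldl (fun e t =>
    match prodcell.get? t with
    | some v => if t ≠ "" then e.insert t (nt ++ "->" ++ v) else e
    | none => if t ∈ fol then e.insert t folval else e.insert t "empty") PySem.Dict.empty

def constructParsingTable_alt (first : List (String × List (String × List String))) (follow : List (String × List String)) (terminals : List String) : List (String × List (String × String)) :=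
  let terms := terminals ++ ["$"]
  let followD := PySem.Dict.ofList follow
  let table := (PySem.Dict.ofList (first.map (fun q => (q.1, PySem.Dict.ofList q.2)))).items.foldl
    (fun tb p => tb.insert p.1 (pvB_row p.1 p.2 followD terms)) PySem.Dict.empty
  table.items.map (fun q => (q.1, q.2.items))

-- ===== PRECONDITION & SPEC =====
-- Pre_ is exactly A's return domain: A raises KeyError on follow[nt] iff some nonterminal of `first`
-- is missing from `follow` while some terminal (incl. the appended '$') escapes its flattened FIRST.
def Pre_constructParsingTable (first : List (String × List (String × List String))) (follow : List (String × List String)) (terminals : List String) : Prop :=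
  ∀ p ∈ (PySem.Dict.ofList (first.map (fun q => (q.1, PySem.Dict.ofList q.2)))).items,
    (PySem.Dict.ofList follow).contains p.1 = true ∨ ∀ t ∈ terminals ++ ["$"], t ∈ p.2.values.flatten
instance (first : List (String × List (String × List String))) (follow : List (String × List String)) (terminals : List String) : Decidable (Pre_constructParsingTable first follow terminals) := by unfold Pre_constructParsingTable; infer_instance

def pvWitness_constructParsingTable : (List (String × List (String × List String))) × (List (String × List String)) × List String :=
  ([("S", [("a", ["a"])])], [("S", ["b"])], ["b"])

def Spec_constructParsingTable (first : List (String × List (String × List String))) (follow : List (String × List String)) (terminals : List String) (out : List (String × List (String × String))) : Prop := out = constructParsingTable_alt first follow terminals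
instance (first : List (String × List (String × List String))) (follow : List (String × List String)) (terminals : List String) (out : List (String × List (String × String))) : Decidable (Spec_constructParsingTable first follow terminals out) := by unfold Spec_constructParsingTable; infer_instance

-- ===== CLAIM (what is proved, stated in full; the proofs are below) =====
def Claim_equal_constructParsingTable : Prop := ∀ (first : List (String × List (String × List String))) (follow : List (String × List String)) (terminals : List String), Dom_constructParsingTable first follow terminals → Pre_constructParsingTable first follow terminals → Spec_constructParsingTable first follow terminals (constructParsingTable first follow terminals)

-- ===== LEMMAS AND PROOFS =====

theorem pv_str_ext {x y : String} (h : x.toList = y.toList) : x = y := String.toList_injective h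

theorem pv_join_cons (a : String) (l : List String) :
    PySem.Str.join "" (a :: l) = a ++ PySem.Str.join "" l := by
  apply pv_str_ext
  cases l <;> simp [PySem.Str.join, PySem.Chars.join, List.intercalate]

theorem pv_join_singleton (a : String) : PySem.Str.join "" [a] = a := by
  apply pv_str_ext
  simp [PySem.Str.join, PySem.Chars.join, List.intercalate]

theorem pv_foldA_inner (vals : List (List String)) (t X : String) (e : PySem.Dict String String) :
    vals.foldl (fun e2 val => if t ∈ val ∧ t ≠ "" then e2.insert t X else e2) e
      = if t ∈ vals.flatten ∧ t ≠ "" then e.insert t X else e := by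
  induction vals generalizing e with
  | nil => simp
  | cons v rest ih =>
    simp only [List.foldl_cons, List.flatten_cons, ih]
    by_cases hv : t ∈ v <;> by_cases hr : t ∈ rest.flatten <;> by_cases ht : t = "" <;>
      simp [hv, hr, ht, PySem.Dict.insert_insert_self, List.mem_append]

theorem pv_get?_foldl_insert_not_mem {l : List String} {t : String}
    (f : PySem.Dict String String → String → String) (d : PySem.Dict String String)
    (h : t ∉ l) :
    (l.foldl (fun d2 s => d2.insert s (f d2 s)) d).get? t = d.get? t := by
  induction l generalizing d with
  | nil => rfl
  | cons s rest ih =>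
    simp only [List.mem_cons, not_or] at h
    rw [List.foldl_cons, ih _ h.2]
    simp [PySem.Dict.get?_insert, h.1]

theorem pv_get?_foldl_inner (l : List String) (hl : l.Nodup) (d : PySem.Dict String String)
    (t k : String) :
    (l.foldl (fun d2 s => d2.insert s (d2.getD s "" ++ k)) d).get? t
      = if t ∈ l then some (d.getD t "" ++ k) else d.get? t := by
  induction l generalizing d with
  | nil => simp
  | cons s rest ih =>
    simp only [List.nodup_cons] at hl
    simp only [List.foldl_cons]
    by_cases hst : s = t
    · subst hst
      rw [pv_get?_foldl_insert_not_mem _ _ hl.1, PySem.Dict.get?_insert_self]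
      simp
    · rw [ih hl.2]
      by_cases htr : t ∈ rest <;>
        simp [htr, Ne.symm hst, PySem.Dict.get?_insert, PySem.Dict.getD_insert]

theorem pv_get?_prodcell_aux (items : List (String × List String)) (d : PySem.Dict String String)
    (t : String) :
    (items.foldl (fun d kv => (PySem.List.dedup kv.2).foldl
        (fun d2 s => d2.insert s (d2.getD s "" ++ kv.1)) d) d).get? t
      = if t ∈ (items.map (·.2)).flatten
        then some (d.getD t "" ++ PySem.Str.join "" ((items.filter (fun kv => decide (t ∈ kv.2))).map (·.1)))
        else d.get? t := by
  induction items generalizing d with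
  | nil => simp
  | cons kv rest ih =>
    simp only [List.foldl_cons, List.map_cons, List.flatten_cons, List.filter_cons]
    rw [ih]
    have h1 := pv_get?_foldl_inner (PySem.List.dedup kv.2) (PySem.List.nodup_dedup _) d t kv.1
    simp only [PySem.List.mem_dedup] at h1
    have h2 : (List.foldl (fun d2 s => d2.insert s (d2.getD s "" ++ kv.1)) d (PySem.List.dedup kv.2)).getD t ""
        = if t ∈ kv.2 then d.getD t "" ++ kv.1 else d.getD t "" := by
      rw [PySem.Dict.getD_eq_get?_getD, h1]
      by_cases hkv : t ∈ kv.2 <;> simp [hkv, PySem.Dict.getD_eq_get?_getD]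
    simp only [PySem.List.dedup_eq_ofList] at h1 h2
    by_cases hr : t ∈ (rest.map (·.2)).flatten
    case neg =>
      have h3 : rest.filter (fun kv => decide (t ∈ kv.2)) = [] := by
        rw [List.filter_eq_nil_iff]
        intro kv' hkv' hmem
        exact hr (List.mem_flatten.mpr ⟨kv'.2, List.mem_map.mpr ⟨kv', hkv', rfl⟩, of_decide_eq_true hmem⟩)
      by_cases hkv : t ∈ kv.2 <;>
        simp [hkv, hr, h1, h3, pv_join_singleton]
    by_cases hkv : t ∈ kv.2 <;>
      simp [hkv, hr, h2, pv_join_cons, String.append_assoc]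

theorem pv_prodcell_get? (fd : PySem.Dict String (List String)) (t : String) :
    (pvB_prodcell fd).get? t
      = if t ∈ fd.values.flatten
        then some (PySem.Str.join "" ((fd.items.filter (fun kv => decide (t ∈ kv.2))).map (·.1)))
        else none := by
  unfold pvB_prodcell
  rw [pv_get?_prodcell_aux]
  simp [PySem.Dict.values]

theorem pv_prodcell_contains (fd : PySem.Dict String (List String)) (t : String) :
    (pvB_prodcell fd).contains t = decide (t ∈ fd.values.flatten) := by
  rw [PySem.Dict.contains_eq_isSome_get?, pv_prodcell_get?]
  by_cases h : t ∈ fd.values.flatten <;> simp [h]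

-- row equality
theorem pv_fold_eq (nt : String) (fd : PySem.Dict String (List String))
    (followD : PySem.Dict String (List String)) (ts : List String)
    (hp : ∀ t ∈ ts, followD.contains nt = true ∨ t ∈ fd.values.flatten) :
    ∀ e, ts.foldl (pvA_entryStep nt fd followD) (some e)
      = some (ts.foldl (fun e t =>
          match (pvB_prodcell fd).get? t with
          | some v => if t ≠ "" then e.insert t (nt ++ "->" ++ v) else e
          | none =>
            if t ∈ followD.getD nt [] then
              e.insert t (if (pvB_prodcell fd).contains "\\L" then nt ++ "->\\L" else "sync")
            else e.insert t "empty") e) := by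
  induction ts with
  | nil => intro e; rfl
  | cons t rest ih =>
    intro e
    have ht := hp t (List.mem_cons_self ..)
    have hstep : pvA_entryStep nt fd followD (some e) t
        = some (match (pvB_prodcell fd).get? t with
            | some v => if t ≠ "" then e.insert t (nt ++ "->" ++ v) else e
            | none =>
              if t ∈ followD.getD nt [] then
                e.insert t (if (pvB_prodcell fd).contains "\\L" then nt ++ "->\\L" else "sync")
              else e.insert t "empty") := by
      unfold pvA_entryStep
      dsimp only
      by_cases hf : t ∈ fd.values.flatten
      · rw [if_pos hf, pv_foldA_inner]
        rw [pv_prodcell_get?, if_pos hf]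
        by_cases ht0 : t = "" <;> simp [hf, ht0, pvA_prodStr]
      · rw [if_neg hf, pv_prodcell_get?, if_neg hf]
        have hc : followD.contains nt = true := by
          rcases ht with h | h
          · exact h
          · exact absurd h hf
        rw [PySem.Dict.contains_eq_isSome_get?] at hc
        obtain ⟨v, hv⟩ := Option.isSome_iff_exists.mp hc
        rw [hv]
        have hgd : followD.getD nt [] = v := PySem.Dict.getD_of_get?_eq_some _ _ hv
        rw [hgd, pv_prodcell_contains]
        by_cases htv : t ∈ v
        · by_cases hL : "\\L" ∈ fd.values.flatten <;> simp [htv, hL]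
        · simp [htv]
    rw [List.foldl_cons, List.foldl_cons, hstep]
    exact ih (fun x hx => hp x (List.mem_cons_of_mem _ hx)) _

theorem pv_row_eq (nt : String) (fd : PySem.Dict String (List String))
    (followD : PySem.Dict String (List String)) (terms : List String)
    (hpre : followD.contains nt = true ∨ ∀ t ∈ terms, t ∈ fd.values.flatten) :
    terms.foldl (pvA_entryStep nt fd followD) (some PySem.Dict.empty)
      = some (pvB_row nt fd followD terms) := by
  have hp : ∀ t ∈ terms, followD.contains nt = true ∨ t ∈ fd.values.flatten := by
    rcases hpre with h | h
    · exact fun t _ => Or.inl h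
    · exact fun t ht => Or.inr (h t ht)
  exact pv_fold_eq nt fd followD terms hp PySem.Dict.empty

theorem pv_table_eq (followD : PySem.Dict String (List String)) (terms : List String)
    (ps : List (String × PySem.Dict String (List String)))
    (hp : ∀ p ∈ ps, followD.contains p.1 = true ∨ ∀ t ∈ terms, t ∈ p.2.values.flatten) :
    ∀ tb : PySem.Dict String (PySem.Dict String String),
      ps.foldl (fun tbl p =>
          match tbl with
          | none => none
          | some tb =>
            match terms.foldl (pvA_entryStep p.1 p.2 followD) (some PySem.Dict.empty) with
            | none => none
            | some e => some (tb.insert p.1 e)) (some tb)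
        = some (ps.foldl (fun tb p => tb.insert p.1 (pvB_row p.1 p.2 followD terms)) tb) := by
  induction ps with
  | nil => intro tb; rfl
  | cons p rest ih =>
    intro tb
    rw [List.foldl_cons, List.foldl_cons]
    rw [pv_row_eq p.1 p.2 followD terms (hp p (List.mem_cons_self ..))]
    exact ih (fun q hq => hp q (List.mem_cons_of_mem _ hq)) _

theorem pv_main : ∀ (first : List (String × List (String × List String))) (follow : List (String × List String)) (terminals : List String), Pre_constructParsingTable first follow terminals → constructParsingTable first follow terminals = constructParsingTable_alt first follow terminals := by
  intro first follow terminals hpre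
  unfold Pre_constructParsingTable at hpre
  unfold constructParsingTable constructParsingTable_alt
  dsimp only
  rw [pv_table_eq (PySem.Dict.ofList follow) (terminals ++ ["$"])
      ((PySem.Dict.ofList (first.map (fun q => (q.1, PySem.Dict.ofList q.2)))).items)
      hpre PySem.Dict.empty]


-- ===== VERDICT (by name: the statement is the Claim_ definition above) =====
theorem constructParsingTable_spec : Claim_equal_constructParsingTable := by
  intro first follow terminals _ hpre
  unfold Spec_constructParsingTable
  exact pv_main first follow terminals hpre
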